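-- pv_equiv track=rewrite | github.com/marctjones/klareco | scripts/extract_sentences.py | unwrap_paragraphs
-- ===== SOURCE A (Python) =====
-- from typing import List, Dict, Optional, Iterator
--
-- def unwrap_paragraphs(text: str) -> List[str]:
--     """
--     Unwrap hard-wrapped paragraphs.
--
--     Args:
--         text: Text with hard-wrapped lines
--
--     Returns:
--         List of unwrapped paragraphs
--     """
--     paragraphs = []
--     current_lines = []
--
--     for line in text.split('\n'):
--         line = line.strip()
--
--         # Empty line = paragraph boundary
--         if not line:
--             if current_lines:
--                 # Join lines with space
--                 paragraphs.append(' '.join(current_lines))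
--                 current_lines = []
--         else:
--             current_lines.append(line)
--
--     # Don't forget last paragraph
--     if current_lines:
--         paragraphs.append(' '.join(current_lines))
--
--     return paragraphs
-- ===== SOURCE B (Python) =====
-- def unwrap_paragraphs(text: str):
--     """Unwrap hard-wrapped paragraphs: two-pointer scan over pre-stripped lines."""
--     lines = [ln.strip() for ln in text.split('\n')]
--     paras = []
--     i, n = 0, len(lines)
--     while i < n:
--         if not lines[i]:
--             i += 1
--             continue
--         j = i
--         while j < n and lines[j]:
--             j += 1
--         paras.append(' '.join(lines[i:j]))
--         i = j
--     return paras
-- ===== Notes on version B (the rewrite author's own statement) =====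
-- stated objective: alternative
-- what changed: Replaces A's single stateful accumulation (current_lines buffer flushed at blank lines and at the end) with a pre-strip pass followed by a two-pointer scan that finds each maximal run of non-empty lines and joins it directly.
import Mathlib
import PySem

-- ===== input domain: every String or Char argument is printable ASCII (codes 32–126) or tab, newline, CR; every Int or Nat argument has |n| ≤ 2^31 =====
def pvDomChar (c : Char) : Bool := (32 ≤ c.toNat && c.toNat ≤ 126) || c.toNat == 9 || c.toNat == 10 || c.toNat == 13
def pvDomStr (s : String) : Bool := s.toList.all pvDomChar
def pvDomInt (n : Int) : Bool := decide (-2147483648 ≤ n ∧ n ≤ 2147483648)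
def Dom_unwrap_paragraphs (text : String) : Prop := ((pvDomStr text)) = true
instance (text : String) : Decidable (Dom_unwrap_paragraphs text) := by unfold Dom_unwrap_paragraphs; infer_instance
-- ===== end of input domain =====

-- ===== PORT A =====
-- A: one stateful pass; blank (after strip) line flushes the current buffer, final flush at the end.
-- (loop body and final flush factored as stepA/finishA; split('\n') has a non-empty separator, so split? is some)
def stepA (st : List String × List String) (l : String) : List String × List String :=
  if l = "" then
    (if st.2 ≠ [] then (st.1 ++ [PySem.Str.join " " st.2], []) else st)
  else (st.1, st.2 ++ [l])

def finishA (st : List String × List String) : List String :=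
  if st.2 ≠ [] then st.1 ++ [PySem.Str.join " " st.2] else st.1

def unwrap_paragraphs (text : String) : List String :=
  finishA
    (((PySem.Str.split? text "\n").getD []).foldl
      (fun st line => stepA st (PySem.Str.strip line)) ([], []))

-- ===== PORT B =====
-- B: strip all lines first, then scan for maximal runs of non-empty lines
-- (the Python inner `while j < n and lines[j]` index scan is the takeWhile/dropWhile split).
def altChunks : List String → List String
  | [] => []
  | l :: ls =>
    if l = "" then altChunks ls
    else PySem.Str.join " " (l :: ls.takeWhile (· ≠ ""))
           :: altChunks (ls.dropWhile (· ≠ ""))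
  termination_by ls => ls.length
  decreasing_by
  · simp
  · simp only [List.length_cons]
    have := List.length_dropWhile_le (p := fun x : String => decide (x ≠ "")) (l := ls)
    omega

def unwrap_paragraphs_alt (text : String) : List String :=
  altChunks (((PySem.Str.split? text "\n").getD []).map PySem.Str.strip)

-- ===== PRECONDITION & SPEC =====
def Spec_unwrap_paragraphs (text : String) (out : List String) : Prop := out = unwrap_paragraphs_alt text
instance (text : String) (out : List String) : Decidable (Spec_unwrap_paragraphs text out) := by unfold Spec_unwrap_paragraphs; infer_instance

-- ===== CLAIM (what is proved, stated in full; the proofs are below) =====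
def Claim_equal_unwrap_paragraphs : Prop := ∀ (text : String), Dom_unwrap_paragraphs text → Spec_unwrap_paragraphs text (unwrap_paragraphs text)

-- ===== LEMMAS AND PROOFS =====

-- A's accumulation, phrased recursively over the already-stripped lines, with the final flush folded in.
def auxA (cur : List String) : List String → List String
  | [] => if cur = [] then [] else [PySem.Str.join " " cur]
  | l :: ls =>
    if l = "" then
      (if cur = [] then auxA [] ls else PySem.Str.join " " cur :: auxA [] ls)
    else auxA (cur ++ [l]) ls

-- A's fold (over stripped lines) followed by the final flush equals auxA.
theorem foldl_eq_auxA (ls : List String) : ∀ (ps cur : List String),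
    finishA (ls.foldl stepA (ps, cur)) = ps ++ auxA cur ls := by
  induction ls with
  | nil =>
    intro ps cur
    by_cases h : cur = [] <;> simp [finishA, auxA, h]
  | cons l ls ih =>
    intro ps cur
    rw [List.foldl_cons]
    by_cases h : l = ""
    · by_cases hc : cur = []
      · rw [show stepA (ps, cur) l = (ps, cur) by simp [stepA, h, hc]]
        simp [ih, auxA, h, hc]
      · rw [show stepA (ps, cur) l = (ps ++ [PySem.Str.join " " cur], []) by
            simp [stepA, h, hc]]
        simp [ih, auxA, h, hc]
    · rw [show stepA (ps, cur) l = (ps, cur ++ [l]) by simp [stepA, h]]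
      simp [ih, auxA, h]

-- auxA with an open buffer is altChunks with the buffer prepended to the next run.
theorem auxA_eq_altChunks (ls : List String) : ∀ (cur : List String),
    auxA cur ls =
      if cur = [] then altChunks ls
      else PySem.Str.join " " (cur ++ ls.takeWhile (· ≠ ""))
             :: altChunks (ls.dropWhile (· ≠ "")) := by
  induction ls with
  | nil =>
    intro cur
    by_cases h : cur = [] <;> simp [auxA, altChunks, h]
  | cons l ls ih =>
    intro cur
    by_cases h : l = ""
    · by_cases hc : cur = [] <;>
        simp [auxA, altChunks, h, hc, ih]
    · by_cases hc : cur = [] <;>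
        simp [auxA, altChunks, h, hc, ih]

-- ===== VERDICT (by name: the statement is the Claim_ definition above) =====
theorem unwrap_paragraphs_spec : Claim_equal_unwrap_paragraphs := by
  intro text _
  unfold Spec_unwrap_paragraphs unwrap_paragraphs unwrap_paragraphs_alt
  rw [show (fun st line => stepA st (PySem.Str.strip line))
        = (fun (st : List String × List String) l => stepA st (PySem.Str.strip l)) from rfl,
    ← List.foldl_map, foldl_eq_auxA, auxA_eq_altChunks]
  simp
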